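-- pv_equiv track=rewrite | github.com/naceur73745/Q-Learning-Algorithm | main.py | count_coop_defect_rate
-- ===== SOURCE A (Python) =====
-- def count_coop_defect_rate (list_of_state):
--       player1_defection_rate = 0
--       palyer1_cooperation_rate= 0
--       #player 2
--       player2_defection_rate = 0
--       palyer2_cooperation_rate= 0
--
--       for state in list_of_state :
--         if state[0] == 1  :
--           player1_defection_rate+= 1
--         else  :
--           palyer1_cooperation_rate+= 1
--
--         if state[1] == 1  :
--           player2_defection_rate+= 1
--         else  :
--           palyer2_cooperation_rate+= 1
--       return  player1_defection_rate , palyer1_cooperation_rate  , player2_defection_rate , palyer2_cooperation_rate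
-- ===== SOURCE B (Python) =====
-- def count_coop_defect_rate(list_of_state):
--     # Build a 4-bucket histogram of (p1-defected?, p2-defected?) outcomes,
--     # then combine bucket multiplicities into the four rates.
--     freq = {}
--     for s in list_of_state:
--         k = (s[0] == 1, s[1] == 1)
--         freq[k] = freq.get(k, 0) + 1
--     dd = freq.get((True, True), 0)
--     dc = freq.get((True, False), 0)
--     cd = freq.get((False, True), 0)
--     cc = freq.get((False, False), 0)
--     return dd + dc, cd + cc, dd + cd, dc + cc
-- ===== Notes on version B (the rewrite author's own statement) =====
-- stated objective: alternative
-- what changed: Replaces the four running counters with a histogram: one pass builds a dict of the four (p1-defected, p2-defected) outcome buckets, and the rates are then combined from bucket multiplicities.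
import Mathlib
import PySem

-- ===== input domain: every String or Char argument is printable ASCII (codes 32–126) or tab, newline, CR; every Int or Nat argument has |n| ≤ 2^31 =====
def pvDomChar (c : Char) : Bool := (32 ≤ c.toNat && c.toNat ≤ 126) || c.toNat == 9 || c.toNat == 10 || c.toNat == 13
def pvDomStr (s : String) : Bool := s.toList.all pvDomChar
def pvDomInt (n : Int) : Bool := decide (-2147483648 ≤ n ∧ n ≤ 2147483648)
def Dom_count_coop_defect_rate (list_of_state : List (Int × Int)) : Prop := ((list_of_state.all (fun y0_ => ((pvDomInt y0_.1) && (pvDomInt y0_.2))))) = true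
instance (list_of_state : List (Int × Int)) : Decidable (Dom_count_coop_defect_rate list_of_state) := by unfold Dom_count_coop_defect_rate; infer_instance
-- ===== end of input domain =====

-- B builds a 4-bucket outcome histogram (a dict) and combines multiplicities, instead of four running counters (objective: alternative).

-- ===== PORT A =====
-- one fold carrying the four running counters, branches in A's order
def count_coop_defect_rate (list_of_state : List (Int × Int)) : Int × Int × Int × Int :=
  let s := list_of_state.foldl
    (fun (acc : Int × Int × Int × Int) state =>
      let acc1 := if state.1 = 1 then (acc.1 + 1, acc.2.1, acc.2.2.1, acc.2.2.2)
                  else (acc.1, acc.2.1 + 1, acc.2.2.1, acc.2.2.2)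
      if state.2 = 1 then (acc1.1, acc1.2.1, acc1.2.2.1 + 1, acc1.2.2.2)
      else (acc1.1, acc1.2.1, acc1.2.2.1, acc1.2.2.2 + 1))
    (0, 0, 0, 0)
  (s.1, s.2.1, s.2.2.1, s.2.2.2)

-- ===== PORT B =====
-- histogram pass: freq[k] = freq.get(k, 0) + 1 per state-outcome key, then bucket lookups
def count_coop_defect_rate_alt (list_of_state : List (Int × Int)) : Int × Int × Int × Int :=
  let freq : PySem.Dict (Bool × Bool) Int :=
    list_of_state.foldl
      (fun d s =>
        let k := (s.1 == 1, s.2 == 1)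
        d.insert k (d.getD k 0 + 1))
      PySem.Dict.empty
  let dd := freq.getD (true, true) 0
  let dc := freq.getD (true, false) 0
  let cd := freq.getD (false, true) 0
  let cc := freq.getD (false, false) 0
  (dd + dc, cd + cc, dd + cd, dc + cc)

-- ===== PRECONDITION & SPEC =====
def Spec_count_coop_defect_rate (list_of_state : List (Int × Int)) (out : Int × Int × Int × Int) : Prop := out = count_coop_defect_rate_alt list_of_state
instance (list_of_state : List (Int × Int)) (out : Int × Int × Int × Int) : Decidable (Spec_count_coop_defect_rate list_of_state out) := by unfold Spec_count_coop_defect_rate; infer_instance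

-- ===== CLAIM (what is proved, stated in full; the proofs are below) =====
def Claim_equal_count_coop_defect_rate : Prop := ∀ (list_of_state : List (Int × Int)), Dom_count_coop_defect_rate list_of_state → Spec_count_coop_defect_rate list_of_state (count_coop_defect_rate list_of_state)

-- ===== LEMMAS AND PROOFS =====

-- A's loop from any start adds the two defection tallies and their complements
theorem pv_fold_char (l : List (Int × Int)) (a b c d : Int) :
    l.foldl
      (fun (acc : Int × Int × Int × Int) state =>
        let acc1 := if state.1 = 1 then (acc.1 + 1, acc.2.1, acc.2.2.1, acc.2.2.2)
                    else (acc.1, acc.2.1 + 1, acc.2.2.1, acc.2.2.2)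
        if state.2 = 1 then (acc1.1, acc1.2.1, acc1.2.2.1 + 1, acc1.2.2.2)
        else (acc1.1, acc1.2.1, acc1.2.2.1, acc1.2.2.2 + 1))
      (a, b, c, d)
    = (a + (l.countP (fun s => s.1 = 1) : Nat),
       b + ((l.length : Int) - (l.countP (fun s => s.1 = 1) : Nat)),
       c + (l.countP (fun s => s.2 = 1) : Nat),
       d + ((l.length : Int) - (l.countP (fun s => s.2 = 1) : Nat))) := by
  induction l generalizing a b c d with
  | nil => simp
  | cons x xs ih =>
    simp only [List.foldl_cons, List.countP_cons, List.length_cons]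
    by_cases h1 : x.1 = 1 <;> by_cases h2 : x.2 = 1 <;>
      simp [h1, h2, ih, Prod.ext_iff] <;> omega

-- the histogram fold's bucket multiplicity is the count of that outcome in the mapped list
theorem pv_hist_getD (l : List (Int × Int)) (d : PySem.Dict (Bool × Bool) Int)
    (v : Bool × Bool) :
    (l.foldl
        (fun d s =>
          let k := ((s.1 == 1 : Bool), (s.2 == 1 : Bool))
          d.insert k (d.getD k 0 + 1)) d).getD v 0
    = d.getD v 0 + ((l.map (fun s => ((s.1 == 1 : Bool), (s.2 == 1 : Bool)))).count v : Nat) := by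
  induction l generalizing d with
  | nil => simp
  | cons x xs ih =>
    simp only [List.foldl_cons, List.map_cons, List.count_cons]
    rw [ih]
    by_cases h : ((x.1 == 1 : Bool), (x.2 == 1 : Bool)) = v
    · subst h
      rw [PySem.Dict.getD_insert_self]
      simp
      ring
    · rw [PySem.Dict.getD_insert_of_ne]
      · simp [h]
      · first | exact h | exact Ne.symm h

-- bucket multiplicities of the outcome histogram recombine into A's tallies
theorem pv_cnt_split (l : List (Int × Int)) :
    (l.map (fun s => ((s.1 == 1 : Bool), (s.2 == 1 : Bool)))).count (true, true)
      + (l.map (fun s => ((s.1 == 1 : Bool), (s.2 == 1 : Bool)))).count (true, false)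
      = l.countP (fun s => s.1 = 1) ∧
    (l.map (fun s => ((s.1 == 1 : Bool), (s.2 == 1 : Bool)))).count (true, true)
      + (l.map (fun s => ((s.1 == 1 : Bool), (s.2 == 1 : Bool)))).count (false, true)
      = l.countP (fun s => s.2 = 1) ∧
    (l.map (fun s => ((s.1 == 1 : Bool), (s.2 == 1 : Bool)))).count (true, true)
      + (l.map (fun s => ((s.1 == 1 : Bool), (s.2 == 1 : Bool)))).count (true, false)
      + (l.map (fun s => ((s.1 == 1 : Bool), (s.2 == 1 : Bool)))).count (false, true)
      + (l.map (fun s => ((s.1 == 1 : Bool), (s.2 == 1 : Bool)))).count (false, false)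
      = l.length := by
  induction l with
  | nil => simp
  | cons x xs ih =>
    obtain ⟨i1, i2, i3⟩ := ih
    by_cases h1 : x.1 = 1 <;> by_cases h2 : x.2 = 1 <;>
      simp [List.count_cons, h1, h2, Prod.ext_iff] <;> omega

-- ===== VERDICT (by name: the statement is the Claim_ definition above) =====
theorem count_coop_defect_rate_spec : Claim_equal_count_coop_defect_rate := by
  intro l _
  unfold Spec_count_coop_defect_rate
  obtain ⟨i1, i2, i3⟩ := pv_cnt_split l
  unfold count_coop_defect_rate count_coop_defect_rate_alt
  simp only [pv_fold_char, pv_hist_getD, PySem.Dict.getD_empty]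
  refine Prod.ext ?_ (Prod.ext ?_ (Prod.ext ?_ ?_)) <;> simp <;> omega
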